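-- pv_equiv track=rewrite | github.com/eset/nimfilt | nimfilt.py | demangle_module
-- ===== SOURCE A (Python) =====
-- import string
--
-- def demangle_module(name):
--     """
--     Demangles a module name.
--
--     See: compiler/msgs.nim -> uniqueModuleName
--
--     :type name: str
--
--     :rtype: str
--     """
--
--     plain = ""
--     i = 0
--     while i < len(name):
--         if name[i] in string.ascii_uppercase:
--             if name[i] == "Z":
--                 plain = plain + "/"
--             elif name[i] == "O":
--                 plain = plain + "."
--             else:
--                 raise ValueError("Invalid special character '{}' in module name".format(name[i]))
--         elif name[i] in string.ascii_lowercase: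
--             plain = plain + name[i]
--         elif name[i] in string.digits and len(name) > i + 1 and name[i + 1] in string.digits:
--             plain = plain + chr(int(name[i:i + 2]))
--             i += 1
--         else:
--             plain = plain + name[i]
--         i += 1
--     return plain
-- ===== SOURCE B (Python) =====
-- import string
-- import re
--
-- def demangle_module(name):
--     pieces = []
--     for m in re.finditer(r'[0-9]{2}|.', name, re.DOTALL):
--         tok = m.group()
--         if len(tok) == 2:
--             pieces.append(chr(int(tok)))
--         elif tok == 'Z':
--             pieces.append('/')
--         elif tok == 'O':
--             pieces.append('.')
--         elif tok in string.ascii_uppercase: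
--             raise ValueError("Invalid special character '{}' in module name".format(tok))
--         else:
--             pieces.append(tok)
--     return ''.join(pieces)
-- ===== Notes on version B (the rewrite author's own statement) =====
-- stated objective: faster
-- what changed: Replaced A's manual index/while loop with quadratic string concatenation by a regex tokenizer (re.finditer(r'[0-9]{2}|.', name, re.DOTALL)) yielding two-digit or single-char tokens, each translated independently, collected in a list and joined once.
import Mathlib
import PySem

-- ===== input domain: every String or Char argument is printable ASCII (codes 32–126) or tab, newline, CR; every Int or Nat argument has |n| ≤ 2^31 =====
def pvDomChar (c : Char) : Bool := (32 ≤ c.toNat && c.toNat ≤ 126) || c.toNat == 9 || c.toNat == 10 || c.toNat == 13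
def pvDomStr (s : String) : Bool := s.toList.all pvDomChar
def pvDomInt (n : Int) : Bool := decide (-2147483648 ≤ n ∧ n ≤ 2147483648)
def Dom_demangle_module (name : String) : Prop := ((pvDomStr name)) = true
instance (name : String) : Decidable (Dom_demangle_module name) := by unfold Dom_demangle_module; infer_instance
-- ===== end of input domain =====

-- B replaces A's manual index loop with a regex-style tokenizer (two digits | single char)
-- with per-token translation and a single join; measured faster (A concatenates strings in a loop).

-- ===== PORT A =====
-- character-class tests, exact for `c in string.ascii_uppercase` etc.
def pvUpper (c : Char) : Bool := 'A' ≤ c && c ≤ 'Z'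
def pvLower (c : Char) : Bool := 'a' ≤ c && c ≤ 'z'
def pvDigit (c : Char) : Bool := '0' ≤ c && c ≤ '9'
-- chr(int(name[i:i+2])) for two digit chars
def pvChr2 (c d : Char) : Char := Char.ofNat (10 * (c.toNat - 48) + (d.toNat - 48))

-- A's while-loop, step for step; `none` = the explicit ValueError
def demangleLoopA (l : List Char) (plain : List Char) : Option (List Char) :=
  match l with
  | [] => some plain
  | c :: rest =>
    if pvUpper c then
      if c = 'Z' then demangleLoopA rest (plain ++ ['/'])
      else if c = 'O' then demangleLoopA rest (plain ++ ['.'])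
      else none
    else if pvLower c then demangleLoopA rest (plain ++ [c])
    else
      match rest with
      | d :: rest' =>
        if pvDigit c && pvDigit d then demangleLoopA rest' (plain ++ [pvChr2 c d])
        else demangleLoopA (d :: rest') (plain ++ [c])
      | [] => demangleLoopA [] (plain ++ [c])
termination_by l.length
decreasing_by all_goals simp

def demangle_module (name : String) : String :=
  ((demangleLoopA name.toList []).map String.ofList).getD ""

-- ===== PORT B =====
-- the token stream of re.finditer(r'[0-9]{2}|.', name, re.DOTALL): left-to-right,
-- a two-digit token when two digits are adjacent, otherwise a single character
def demangleTokens : List Char → List (List Char)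
  | [] => []
  | [c] => [[c]]
  | c :: d :: rest =>
    if pvDigit c && pvDigit d then [c, d] :: demangleTokens rest
    else [c] :: demangleTokens (d :: rest)

-- the loop body: one piece per token; `none` = the explicit ValueError
def demangleTok : List Char → Option (List Char)
  | [c, d] => some [pvChr2 c d]
  | [c] =>
    if c = 'Z' then some ['/']
    else if c = 'O' then some ['.']
    else if pvUpper c then none
    else some [c]
  | _ => some []

-- the for-loop accumulating `pieces` (stops with none at the raise)
def demanglePieces : List (List Char) → Option (List (List Char))
  | [] => some []
  | t :: ts => do
    let p ← demangleTok t
    let ps ← demanglePieces ts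
    pure (p :: ps)

def demangle_module_alt (name : String) : String :=
  ((((demanglePieces (demangleTokens name.toList)).map List.flatten).map String.ofList)).getD ""

-- ===== PRECONDITION & SPEC =====
-- A raises ValueError on any uppercase letter that is not one of the two special markers; Pre_ excludes exactly those inputs.
def Pre_demangle_module (name : String) : Prop :=
  (name.toList.all (fun c => !('A' ≤ c && c ≤ 'Z') || (c == 'Z' || c == 'O'))) = true
instance (name : String) : Decidable (Pre_demangle_module name) := by
  unfold Pre_demangle_module; infer_instance

def pvWitness_demangle_module : String := "aZb99O"

def Spec_demangle_module (name : String) (out : String) : Prop := out = demangle_module_alt name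
instance (name : String) (out : String) : Decidable (Spec_demangle_module name out) := by
  unfold Spec_demangle_module; infer_instance

-- ===== CLAIM (what is proved, stated in full; the proofs are below) =====
def Claim_equal_demangle_module : Prop :=
  ∀ (name : String), Dom_demangle_module name → Pre_demangle_module name →
    Spec_demangle_module name (demangle_module name)

-- ===== LEMMAS AND PROOFS =====
theorem demangleLoopA_eq (l : List Char) (acc : List Char) :
    demangleLoopA l acc =
      (demanglePieces (demangleTokens l)).map (fun ts => acc ++ ts.flatten) := by
  fun_induction demangleTokens l generalizing acc with
  | case1 =>
    simp [demangleLoopA, demanglePieces]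
  | case2 c =>
    by_cases hu : pvUpper c
    · by_cases hz : c = 'Z'
      · subst hz
        simp [demangleLoopA, demangleTok, demanglePieces, hu]
      · by_cases ho : c = 'O'
        · subst ho
          simp [demangleLoopA, demangleTok, demanglePieces, hu, hz]
        · have hl : ¬ pvLower c = true := by
            simp only [pvUpper, pvLower, Bool.and_eq_true, decide_eq_true_eq] at hu ⊢
            rintro ⟨h1, h2⟩
            exact absurd (le_trans h1 hu.2) (by decide)
          simp [demangleLoopA, demangleTok, demanglePieces, hu, hz, ho]
    · have hz : c ≠ 'Z' := by rintro rfl; exact hu (by decide)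
      have ho : c ≠ 'O' := by rintro rfl; exact hu (by decide)
      by_cases hl : pvLower c <;>
        simp [demangleLoopA, demangleTok, demanglePieces, hu, hz, ho]
  | case3 c d rest hdd ih =>
    have hu : ¬ pvUpper c = true := by
      simp only [pvUpper, pvDigit, Bool.and_eq_true, decide_eq_true_eq] at hdd ⊢
      rintro ⟨h1, _⟩
      exact absurd (le_trans h1 hdd.1.2) (by decide)
    have hl : ¬ pvLower c = true := by
      simp only [pvLower, pvDigit, Bool.and_eq_true, decide_eq_true_eq] at hdd ⊢
      rintro ⟨h1, _⟩
      exact absurd (le_trans h1 hdd.1.2) (by decide)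
    rw [demangleLoopA]
    simp only [hu, hl, hdd, Bool.false_eq_true, ↓reduceIte]
    rw [ih]
    simp only [demanglePieces, demangleTok]
    cases demanglePieces (demangleTokens rest) <;> simp
  | case4 c d rest hdd ih =>
    rw [demangleLoopA]
    by_cases hu : pvUpper c
    · by_cases hz : c = 'Z'
      · subst hz
        simp only [hu, ↓reduceIte]
        rw [ih]
        simp only [demanglePieces, demangleTok, ↓reduceIte]
        cases demanglePieces (demangleTokens (d :: rest)) <;> simp
      · by_cases ho : c = 'O'
        · subst ho
          simp only [hu, hz, ↓reduceIte]
          rw [ih]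
          simp only [demanglePieces, demangleTok, ↓reduceIte, if_neg hz]
          cases demanglePieces (demangleTokens (d :: rest)) <;> simp
        · simp only [hu, hz, ho, ↓reduceIte]
          simp [demanglePieces, demangleTok, hz, ho, hu]
    · have hz : c ≠ 'Z' := by rintro rfl; exact hu (by decide)
      have ho : c ≠ 'O' := by rintro rfl; exact hu (by decide)
      by_cases hl : pvLower c
      all_goals
      · simp only [hu, hl, hdd, Bool.false_eq_true, ↓reduceIte]
        rw [ih]
        simp only [demanglePieces, demangleTok, if_neg hz, if_neg ho, if_neg hu]
        cases demanglePieces (demangleTokens (d :: rest)) <;> simp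

-- ===== VERDICT (by name: the statement is the Claim_ definition above) =====
theorem demangle_module_spec : Claim_equal_demangle_module := by
  intro name _ _
  unfold Spec_demangle_module demangle_module demangle_module_alt
  rw [demangleLoopA_eq]
  cases demanglePieces (demangleTokens name.toList) <;> simp
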